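-- pv_equiv track=rewrite | github.com/she-bear/Practice-Python | task_4_6_b.py | cycle_generator
-- ===== SOURCE A (Python) =====
-- from itertools import cycle
--
-- def cycle_generator(input_list, end_value):
--     count = 1
--     for element in cycle(input_list):
--         if count > end_value:
--             break
--         else:
--             yield element
--         count += 1
-- ===== SOURCE B (Python) =====
-- def cycle_generator(input_list, end_value):
--     n = len(input_list)
--     k = max(int(end_value), 0) if n else 0
--     q, r = divmod(k, n) if n else (0, 0)
--     yield from input_list * q
--     yield from input_list[:r]
-- ===== Notes on version B (the rewrite author's own statement) =====
-- stated objective: alternative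
-- what changed: Replaces the element-by-element loop over an infinite cycle iterator with a break by closed-form arithmetic: divmod splits the yield count into q whole passes and a remainder, emitted in bulk as list replication (input_list * q) followed by a slice input_list[:r].
import Mathlib
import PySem

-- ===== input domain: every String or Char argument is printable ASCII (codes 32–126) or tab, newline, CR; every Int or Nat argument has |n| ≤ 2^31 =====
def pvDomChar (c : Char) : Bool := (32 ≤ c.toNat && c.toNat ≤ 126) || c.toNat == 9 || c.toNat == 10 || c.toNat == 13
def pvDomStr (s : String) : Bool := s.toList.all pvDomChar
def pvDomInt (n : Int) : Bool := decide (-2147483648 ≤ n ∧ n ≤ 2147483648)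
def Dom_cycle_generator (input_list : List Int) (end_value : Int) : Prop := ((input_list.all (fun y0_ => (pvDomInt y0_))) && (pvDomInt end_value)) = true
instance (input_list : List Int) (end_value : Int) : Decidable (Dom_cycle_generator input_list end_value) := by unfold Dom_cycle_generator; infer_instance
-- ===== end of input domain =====

-- B replaces A's element-by-element loop over an infinite cycle iterator by divmod arithmetic:
-- q whole passes emitted as list replication plus a slice of the remainder (alternative; same cost).

-- ===== PORT A =====
-- the for-loop over cycle(input_list): `rest` is the iterator's remaining tail of the current
-- pass (refilled from `input_list` when exhausted); `fuel` counts the remaining yields, i.e.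
-- end_value - count + 1 clamped at 0 (the loop breaks as soon as count > end_value).
def cycleA (l : List Int) (rest : List Int) (fuel : Nat) : List Int :=
  match fuel, rest with
  | 0, _ => []
  | _ + 1, [] => []          -- cycle([]) yields nothing: the for-loop body never runs
  | f + 1, x :: rs => x :: cycleA l (if rs.isEmpty then l else rs) f

def cycle_generator (input_list : List Int) (end_value : Int) : List Int :=
  cycleA input_list input_list end_value.toNat

-- ===== PORT B =====
def cycle_generator_alt (input_list : List Int) (end_value : Int) : List Int :=
  let n : Int := input_list.length
  let k : Int := if n ≠ 0 then max end_value 0 else 0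
  let qr : Int × Int :=
    if n ≠ 0 then (PySem.Int.floordiv k n, PySem.Int.mod k n) else (0, 0)
  PySem.List.pyRepeat input_list qr.1 ++ PySem.List.slice input_list none (some qr.2)

-- ===== PRECONDITION & SPEC =====
def Spec_cycle_generator (input_list : List Int) (end_value : Int) (out : List Int) : Prop := out = cycle_generator_alt input_list end_value
instance (input_list : List Int) (end_value : Int) (out : List Int) : Decidable (Spec_cycle_generator input_list end_value out) := by unfold Spec_cycle_generator; infer_instance

-- ===== CLAIM (what is proved, stated in full; the proofs are below) =====
def Claim_equal_cycle_generator : Prop := ∀ (input_list : List Int) (end_value : Int), Dom_cycle_generator input_list end_value → Spec_cycle_generator input_list end_value (cycle_generator input_list end_value)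

-- ===== LEMMAS AND PROOFS =====

-- when the fuel does not outlast the current pass, A's loop is a plain take
theorem cycleA_take (l : List Int) :
    ∀ (rest : List Int) (f : Nat), f ≤ rest.length → cycleA l rest f = rest.take f := by
  intro rest
  induction rest with
  | nil => intro f _; cases f <;> simp [cycleA]
  | cons x rs ih =>
    intro f hf
    cases f with
    | zero => simp [cycleA]
    | succ m =>
      simp only [List.length_cons] at hf
      have hm : m ≤ rs.length := by omega
      by_cases h : rs = []
      · subst h
        have hm0 : m = 0 := by simpa using hm
        subst hm0; simp [cycleA]
      · simp [cycleA, List.isEmpty_iff, h, ih m hm]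

-- one whole pass of the iterator: consume `rest`, refill, continue from the full list
theorem cycleA_pass (l : List Int) :
    ∀ (rest : List Int), rest ≠ [] → ∀ m, cycleA l rest (rest.length + m) = rest ++ cycleA l l m := by
  intro rest
  induction rest with
  | nil => intro h; exact absurd rfl h
  | cons x rs ih =>
    intro _ m
    by_cases h : rs = []
    · subst h
      have h1 : ([x] : List Int).length + m = m + 1 := by simp [Nat.add_comm]
      rw [h1]; simp [cycleA]
    · have : (x :: rs).length + m = (rs.length + m) + 1 := by simp; omega
      rw [this]
      simp [cycleA, List.isEmpty_iff, h, ih h m]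

-- q whole passes plus a remainder r ≤ len: replication plus a take
theorem cycleA_split (l : List Int) (hl : l ≠ []) :
    ∀ (q r : Nat), r ≤ l.length →
      cycleA l l (q * l.length + r) = (List.replicate q l).flatten ++ l.take r := by
  intro q
  induction q with
  | zero => intro r hr; simpa using cycleA_take l l r hr
  | succ p ih =>
    intro r hr
    have : (p + 1) * l.length + r = l.length + (p * l.length + r) := by ring
    rw [this, cycleA_pass l l hl, ih r hr]
    simp [List.replicate_succ]

theorem cycle_generator_spec : Claim_equal_cycle_generator := by
  intro l e _
  unfold Spec_cycle_generator cycle_generator cycle_generator_alt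
  by_cases hl : l = []
  · subst hl
    have : ∀ n, cycleA [] [] n = [] := by intro n; cases n <;> simp [cycleA]
    simp [this, PySem.List.pyRepeat, PySem.List.slice_to [] (le_refl (0 : Int))]
  · have hn : (l.length : Int) ≠ 0 := by
      simpa using (List.length_pos_iff.mpr hl).ne'
    simp only [hn, ne_eq, not_false_eq_true, if_true]
    have hnpos : (0 : Int) < (l.length : Int) := by
      exact_mod_cast List.length_pos_iff.mpr hl
    set k : Int := max e 0 with hk
    set q : Int := PySem.Int.floordiv k (l.length : Int) with hq
    set r : Int := PySem.Int.mod k (l.length : Int) with hr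
    have hid : q * (l.length : Int) + r = k := PySem.Int.floordiv_mul_add_mod k _
    have hr0 : 0 ≤ r := PySem.Int.mod_nonneg k hnpos
    have hrlt : r < (l.length : Int) := PySem.Int.mod_lt k hnpos
    have hq0 : 0 ≤ q := by
      rw [hq]
      exact (PySem.Int.le_floordiv_iff_mul_le hnpos).mpr (by simp [hk])
    have hk0 : 0 ≤ k := le_max_right _ _
    have hke : e ≤ k := le_max_left _ _
    have hkc : k = e ∨ k = 0 := by
      rcases max_choice e 0 with h | h
      · exact Or.inl (hk.trans h)
      · exact Or.inr (hk.trans h)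
    have hcast : ((q.toNat * l.length : Nat) : Int) = q * (l.length : Int) := by
      push_cast [Int.toNat_of_nonneg hq0]; ring
    have hkval : e.toNat = q.toNat * l.length + r.toNat := by
      rcases hkc with h | h <;> omega
    rw [hkval, cycleA_split l hl q.toNat r.toNat (by omega)]
    rw [PySem.List.pyRepeat, PySem.List.slice_to l hr0]

-- ===== VERDICT =====
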